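-- pv_equiv track=rewrite | github.com/yanyc428/rsa | rsa.py | decode_b64
-- ===== SOURCE A (Python) =====
-- def decode_b64(string):
--     table = {"0": 0, "1": 1, "2": 2, "3": 3, "4": 4, "5": 5,
--              "6": 6, "7": 7, "8": 8, "9": 9,
--              "a": 10, "b": 11, "c": 12, "d": 13, "e": 14, "f": 15, "g": 16,
--              "h": 17, "i": 18, "j": 19, "k": 20, "l": 21, "m": 22, "n": 23,
--              "o": 24, "p": 25, "q": 26, "r": 27, "s": 28, "t": 29, "u": 30,
--              "v": 31, "w": 32, "x": 33, "y": 34, "z": 35,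
--              "A": 36, "B": 37, "C": 38, "D": 39, "E": 40, "F": 41, "G": 42,
--              "H": 43, "I": 44, "J": 45, "K": 46, "L": 47, "M": 48, "N": 49,
--              "O": 50, "P": 51, "Q": 52, "R": 53, "S": 54, "T": 55, "U": 56,
--              "V": 57, "W": 58, "X": 59, "Y": 60, "Z": 61,
--              "-": 62, "_": 63}
--     result = 0
--     for i in range(len(string)):
--         result *= 64
--         result += table[string[i]]
--     return result
-- ===== SOURCE B (Python) =====
-- def decode_b64(string):
--     def val(c):
--         if '0' <= c <= '9':
--             return ord(c) - 48
--         if 'a' <= c <= 'z':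
--             return ord(c) - 87
--         if 'A' <= c <= 'Z':
--             return ord(c) - 29
--         if c == '-':
--             return 62
--         if c == '_':
--             return 63
--         raise KeyError(c)
--     total = 0
--     place = 1
--     for c in reversed(string):
--         total += val(c) * place
--         place *= 64
--     return total
-- ===== Notes on version B (the rewrite author's own statement) =====
-- stated objective: alternative
-- what changed: B walks the string back-to-front accumulating digit*place with an explicit place value (place *= 64), and computes each digit arithmetically from character code ranges instead of A's dict lookup with Horner accumulation.
import Mathlib
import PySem

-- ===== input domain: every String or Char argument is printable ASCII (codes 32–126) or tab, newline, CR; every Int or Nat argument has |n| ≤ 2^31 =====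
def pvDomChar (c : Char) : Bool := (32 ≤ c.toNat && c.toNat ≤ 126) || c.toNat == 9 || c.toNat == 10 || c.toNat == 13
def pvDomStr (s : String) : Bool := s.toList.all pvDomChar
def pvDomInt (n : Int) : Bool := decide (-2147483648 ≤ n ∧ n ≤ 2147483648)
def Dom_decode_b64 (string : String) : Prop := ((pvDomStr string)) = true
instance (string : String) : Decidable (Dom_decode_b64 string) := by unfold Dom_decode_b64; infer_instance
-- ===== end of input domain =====

-- B replaces A's dict-lookup Horner scan with a back-to-front accumulation of
-- digit*place (place *= 64 each step), computing digits from character-code ranges.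

-- ===== PORT A =====
-- the dict literal 'table', as a lookup returning none exactly where Python raises KeyError
def tableGet? (c : Char) : Option Int :=
  match c with
  | '0' => some 0
  | '1' => some 1
  | '2' => some 2
  | '3' => some 3
  | '4' => some 4
  | '5' => some 5
  | '6' => some 6
  | '7' => some 7
  | '8' => some 8
  | '9' => some 9
  | 'a' => some 10
  | 'b' => some 11
  | 'c' => some 12
  | 'd' => some 13
  | 'e' => some 14
  | 'f' => some 15
  | 'g' => some 16
  | 'h' => some 17
  | 'i' => some 18
  | 'j' => some 19
  | 'k' => some 20
  | 'l' => some 21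
  | 'm' => some 22
  | 'n' => some 23
  | 'o' => some 24
  | 'p' => some 25
  | 'q' => some 26
  | 'r' => some 27
  | 's' => some 28
  | 't' => some 29
  | 'u' => some 30
  | 'v' => some 31
  | 'w' => some 32
  | 'x' => some 33
  | 'y' => some 34
  | 'z' => some 35
  | 'A' => some 36
  | 'B' => some 37
  | 'C' => some 38
  | 'D' => some 39
  | 'E' => some 40
  | 'F' => some 41
  | 'G' => some 42
  | 'H' => some 43
  | 'I' => some 44
  | 'J' => some 45
  | 'K' => some 46
  | 'L' => some 47
  | 'M' => some 48
  | 'N' => some 49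
  | 'O' => some 50
  | 'P' => some 51
  | 'Q' => some 52
  | 'R' => some 53
  | 'S' => some 54
  | 'T' => some 55
  | 'U' => some 56
  | 'V' => some 57
  | 'W' => some 58
  | 'X' => some 59
  | 'Y' => some 60
  | 'Z' => some 61
  | '-' => some 62
  | '_' => some 63
  | _ => none

-- for i in range(len(string)): result *= 64; result += table[string[i]]
-- table[c] raises KeyError for c outside the table; those inputs are excluded by Pre_,
-- so the port reads the lookup with default 0 (never reached inside Pre_).
def decode_b64 (string : String) : Int :=
  string.toList.foldl (fun result c => result * 64 + (tableGet? c).getD 0) 0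

-- ===== PORT B =====
-- helper val(c): the digit from character-code ranges; B raises KeyError outside the
-- 64-symbol alphabet (excluded by Pre_), the port returns 0 there (never reached inside Pre_).
def altVal (c : Char) : Int :=
  if '0' ≤ c ∧ c ≤ '9' then (c.toNat : Int) - 48
  else if 'a' ≤ c ∧ c ≤ 'z' then (c.toNat : Int) - 87
  else if 'A' ≤ c ∧ c ≤ 'Z' then (c.toNat : Int) - 29
  else if c = '-' then 62
  else if c = '_' then 63
  else 0

-- total = 0; place = 1; for c in reversed(string): total += val(c)*place; place *= 64
def decode_b64_alt (string : String) : Int :=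
  (string.toList.reverse.foldl
    (fun (st : Int × Int) c => (st.1 + altVal c * st.2, st.2 * 64)) (0, 1)).1

-- ===== PRECONDITION & SPEC =====
-- Pre_ excludes exactly the strings containing a character outside the 64-symbol table,
-- on which Python A raises KeyError (and B raises KeyError too).
def Pre_decode_b64 (string : String) : Prop :=
  string.toList.all (fun c => (tableGet? c).isSome) = true
instance (string : String) : Decidable (Pre_decode_b64 string) := by
  unfold Pre_decode_b64; infer_instance
def pvWitness_decode_b64 : String := "a7"
def Spec_decode_b64 (string : String) (out : Int) : Prop := out = decode_b64_alt string
instance (string : String) (out : Int) : Decidable (Spec_decode_b64 string out) := by unfold Spec_decode_b64; infer_instance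

-- ===== CLAIM (what is proved, stated in full; the proofs are below) =====
def Claim_equal_decode_b64 : Prop := ∀ (string : String), Dom_decode_b64 string → Pre_decode_b64 string → Spec_decode_b64 string (decode_b64 string)

-- ===== LEMMAS AND PROOFS =====

theorem altVal_eq (c : Char) (v : Int) (h : tableGet? c = some v) : altVal c = v := by
  unfold tableGet? at h
  split at h <;>
    first
      | injection h
      | simp at h

-- B's reverse fold with places equals Horner (with altVal) on the re-reversed list
theorem revfold_horner (m : List Char) (t p : Int) :
    (m.foldl (fun (st : Int × Int) c => (st.1 + altVal c * st.2, st.2 * 64)) (t, p)).1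
      = t + p * m.reverse.foldl (fun r c => r * 64 + altVal c) 0 := by
  induction m generalizing t p with
  | nil => simp
  | cons c tl ih =>
    simp only [List.foldl_cons, List.reverse_cons, List.foldl_append, List.foldl_cons,
      List.foldl_nil, ih]
    ring

-- on table characters the two digit functions agree, hence the two Horner folds agree
theorem horner_congr (l : List Char) (a : Int)
    (h : ∀ c ∈ l, (tableGet? c).isSome = true) :
    l.foldl (fun r c => r * 64 + (tableGet? c).getD 0) a
      = l.foldl (fun r c => r * 64 + altVal c) a := by
  induction l generalizing a with
  | nil => rfl
  | cons c tl ih =>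
    obtain ⟨v, hv⟩ := Option.isSome_iff_exists.mp (h c (by simp))
    simp only [List.foldl_cons, hv, Option.getD_some, altVal_eq c v hv]
    exact ih _ (fun d hd => h d (by simp [hd]))

-- ===== VERDICT (by name: the statement is the Claim_ definition above) =====
theorem decode_b64_spec : Claim_equal_decode_b64 := by
  intro s _ hpre
  unfold Spec_decode_b64 decode_b64 decode_b64_alt
  rw [revfold_horner, List.reverse_reverse, horner_congr s.toList 0 (List.all_eq_true.mp hpre)]
  ring
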